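-- pv_equiv track=rewrite | github.com/Lucas-far/practice_english | metodos/bdd.py | painter
-- ===== SOURCE A (Python) =====
-- def painter(color: str = 'blue', text: str = 'texto'):
--     """"""
--     # keys = conditions / values = actions of the conditions
--     colors = {
--         'black': '\033[1:30m' + text + '\033[m', 'red': '\033[1:31m' + text + '\033[m',
--         'green': '\033[1:32m' + text + '\033[m', 'yellow': '\033[1:33m' + text + '\033[m',
--         'blue': '\033[1:34m' + text + '\033[m', 'purple': '\033[1:35m' + text + '\033[m',
--         'cyan': '\033[1:36m' + text + '\033[m'
--     }
--
--     for key in colors: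
--         if color == key:
--             return colors[key]
-- ===== SOURCE B (Python) =====
-- def painter(color: str = 'blue', text: str = 'texto'):
--     names = ['black', 'red', 'green', 'yellow', 'blue', 'purple', 'cyan']
--     if color not in names:
--         return None
--     return f'\033[1:{30 + names.index(color)}m{text}\033[m'
-- ===== Notes on version B (the rewrite author's own statement) =====
-- stated objective: simpler
-- what changed: Replaces the dict of seven pre-formatted strings scanned by a loop with an ordered name list; the ANSI code is computed arithmetically as 30 + index and the result formatted once.
import Mathlib
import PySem

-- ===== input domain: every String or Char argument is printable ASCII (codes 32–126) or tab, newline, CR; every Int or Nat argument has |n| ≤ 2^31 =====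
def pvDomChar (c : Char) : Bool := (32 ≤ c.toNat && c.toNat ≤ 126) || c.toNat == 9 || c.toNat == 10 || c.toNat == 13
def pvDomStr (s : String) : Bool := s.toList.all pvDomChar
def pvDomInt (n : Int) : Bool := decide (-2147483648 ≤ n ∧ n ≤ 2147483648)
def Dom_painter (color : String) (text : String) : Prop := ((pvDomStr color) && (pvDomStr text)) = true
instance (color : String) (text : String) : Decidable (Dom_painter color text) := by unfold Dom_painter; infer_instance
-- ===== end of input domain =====

-- B computes the ANSI code as 30 + the colour's index in an ordered name list, instead of A's
-- loop over a dict of seven pre-formatted strings (objective: simpler).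

-- ===== PORT A =====
-- the 'for key in colors: if color == key: return colors[key]' loop over the dict's pairs in insertion order
def painterLoop (color : String) : List (String × String) → Option String
  | [] => none
  | (k, v) :: rest => if color = k then some v else painterLoop color rest

def painter (color : String) (text : String) : Option String :=
  let colors : List (String × String) :=
    [("black", "\x1b[1:30m" ++ text ++ "\x1b[m"), ("red", "\x1b[1:31m" ++ text ++ "\x1b[m"),
     ("green", "\x1b[1:32m" ++ text ++ "\x1b[m"), ("yellow", "\x1b[1:33m" ++ text ++ "\x1b[m"),
     ("blue", "\x1b[1:34m" ++ text ++ "\x1b[m"), ("purple", "\x1b[1:35m" ++ text ++ "\x1b[m"),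
     ("cyan", "\x1b[1:36m" ++ text ++ "\x1b[m")]
  painterLoop color colors

-- ===== PORT B =====
def painter_alt (color : String) (text : String) : Option String :=
  let names : List String := ["black", "red", "green", "yellow", "blue", "purple", "cyan"]
  match PySem.List.index? names color with
  | none => none
  | some i => some ("\x1b[1:" ++ PySem.Int.toStr (30 + (i : Int)) ++ "m" ++ text ++ "\x1b[m")

-- ===== PRECONDITION & SPEC =====
def Spec_painter (color : String) (text : String) (out : Option String) : Prop := out = painter_alt color text
instance (color : String) (text : String) (out : Option String) : Decidable (Spec_painter color text out) := by unfold Spec_painter; infer_instance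

-- ===== CLAIM (what is proved, stated in full; the proofs are below) =====
def Claim_equal_painter : Prop := ∀ (color : String) (text : String), Dom_painter color text → Spec_painter color text (painter color text)

-- ===== LEMMAS AND PROOFS =====

-- ===== VERDICT (by name: the statement is the Claim_ definition above) =====
theorem painter_spec : Claim_equal_painter := by
  intro color text _
  unfold Spec_painter painter painter_alt
  by_cases h1 : color = "black"
  · subst h1
    simp [painterLoop]
    rw [show List.idxOf? "black" ["black", "red", "green", "yellow", "blue", "purple", "cyan"] = some 0 from by decide]
    simp
    decide
  by_cases h2 : color = "red"
  · subst h2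
    simp [painterLoop, h1]
    rw [show List.idxOf? "red" ["black", "red", "green", "yellow", "blue", "purple", "cyan"] = some 1 from by decide]
    simp
    decide
  by_cases h3 : color = "green"
  · subst h3
    simp [painterLoop, h1, h2]
    rw [show List.idxOf? "green" ["black", "red", "green", "yellow", "blue", "purple", "cyan"] = some 2 from by decide]
    simp
    decide
  by_cases h4 : color = "yellow"
  · subst h4
    simp [painterLoop, h1, h2, h3]
    rw [show List.idxOf? "yellow" ["black", "red", "green", "yellow", "blue", "purple", "cyan"] = some 3 from by decide]
    simp
    decide
  by_cases h5 : color = "blue"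
  · subst h5
    simp [painterLoop, h1, h2, h3, h4]
    rw [show List.idxOf? "blue" ["black", "red", "green", "yellow", "blue", "purple", "cyan"] = some 4 from by decide]
    simp
    decide
  by_cases h6 : color = "purple"
  · subst h6
    simp [painterLoop, h1, h2, h3, h4, h5]
    rw [show List.idxOf? "purple" ["black", "red", "green", "yellow", "blue", "purple", "cyan"] = some 5 from by decide]
    simp
    decide
  by_cases h7 : color = "cyan"
  · subst h7
    simp [painterLoop, h1, h2, h3, h4, h5, h6]
    rw [show List.idxOf? "cyan" ["black", "red", "green", "yellow", "blue", "purple", "cyan"] = some 6 from by decide]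
    simp
    decide
  simp [painterLoop, h1, h2, h3, h4, h5, h6, h7]
  rw [show List.idxOf? color ["black", "red", "green", "yellow", "blue", "purple", "cyan"] = none from by
    rw [List.idxOf?_eq_none_iff]; simp [h1, h2, h3, h4, h5, h6, h7]]
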